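-- pv_equiv track=rewrite | github.com/psenzee/MuGen | src/Scale.py | max_match_heptatonic_scale
-- ===== SOURCE A (Python) =====
-- HEPTATONIC_SCALES = [
--   [0, 2, 4, 5, 7, 9, 11], # ionian | diatonic | major
--   [0, 2, 4, 5, 7, 9, 10], # mixolydian
--   [0, 2, 3, 5, 7, 8, 10], # aeolian | natural minor | melodic minor desc
--   [0, 2, 4, 6, 7, 9, 11], # lydian
--   [0, 2, 3, 5, 7, 9, 10], # dorian
--   [0, 1, 3, 5, 7, 8, 10], # phrygian
--   [0, 2, 3, 5, 7, 8, 11], # harmonic minor | aeolian #7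
--   [0, 2, 3, 5, 7, 9, 11], # melodic minor asc | jazz minor 1 | ionian b3
--   [0, 1, 3, 5, 6, 8, 10], # locrian
--   [0, 1, 4, 5, 7, 8, 10], # flamenco | phrygian #4
--   [0, 1, 4, 5, 7, 8, 11], # double harmonic major | phrygian #4 #7
--   [0, 2, 3, 6, 7, 8, 11], # hungarian minor | aeolian #4 #7
--   [0, 1, 3, 5, 7, 9, 10], # jazz minor mode 2
--   [0, 2, 4, 6, 8, 9, 11], # jazz minor mode 3
--   [0, 2, 4, 6, 7, 9, 10], # jazz minor mode 4
--   [0, 2, 4, 5, 7, 8, 10], # jazz minor mode 5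
--   [0, 2, 3, 5, 6, 8, 10], # jazz minor mode 6
--   [0, 1, 3, 4, 6, 8, 10]  # jazz minor mode 7
-- ]
--
-- def count_common_notes(scale, notes):
--   count = 0
--   scale = set([n % 12 for n in scale])
--   for n in set(notes):
--     if (n % 12) in scale:
--       count = count + 1
--   return count
--
-- def max_match_heptatonic_scale(notes):
--   max = 0
--   best = []
--   for scale in HEPTATONIC_SCALES:
--     count = count_common_notes(scale, notes)
--     if count > max:
--       max = count
--       best = scale
--   return best
-- ===== SOURCE B (Python) =====
-- # Bitmask re-implementation: scales are 12-bit pitch-class masks, the note set is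
-- # folded into a 12-slot pitch-class histogram, scores are masked sums, and the
-- # winning mask (0 = none) is decoded back into the note list at the very end.
-- SCALE_MASKS = [2741, 1717, 1453, 2773, 1709, 1451, 2477, 2733, 1387,
--                1459, 2483, 2509, 1707, 2901, 1749, 1461, 1389, 1371]
--
-- def max_match_heptatonic_scale(notes):
--   hist = [0] * 12
--   for n in set(notes):
--     hist[n % 12] += 1
--   best_mask = 0
--   best_count = 0
--   for mask in SCALE_MASKS:
--     c = 0
--     for p in range(12):
--       if (mask >> p) & 1:
--         c += hist[p]
--     if c > best_count:
--       best_count = c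
--       best_mask = mask
--   return [p for p in range(12) if (best_mask >> p) & 1]
-- ===== Notes on version B (the rewrite author's own statement) =====
-- stated objective: faster
-- what changed: Replaces A's 18 per-scale rescans of set(notes) (each rebuilding the note set and the scale's mod-12 set) with one pass over the distinct notes into a 12-slot pitch-class histogram; scales are stored as 12-bit masks, each score is a constant-time masked sum over the histogram, and only the winning mask (0 = none) is decoded back to a note list.
import Mathlib
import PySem

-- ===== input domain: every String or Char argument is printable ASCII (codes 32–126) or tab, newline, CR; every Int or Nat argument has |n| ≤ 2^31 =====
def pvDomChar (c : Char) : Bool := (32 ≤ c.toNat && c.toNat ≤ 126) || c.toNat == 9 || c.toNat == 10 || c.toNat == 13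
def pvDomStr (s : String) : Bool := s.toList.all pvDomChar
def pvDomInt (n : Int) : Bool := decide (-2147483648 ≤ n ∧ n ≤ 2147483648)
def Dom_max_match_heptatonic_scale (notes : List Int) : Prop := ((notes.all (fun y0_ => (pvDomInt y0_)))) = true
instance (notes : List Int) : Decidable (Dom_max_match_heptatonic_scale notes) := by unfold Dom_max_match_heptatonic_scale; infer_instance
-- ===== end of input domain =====

-- B replaces A's 18 rescans of the note set by a 12-slot pitch-class histogram built in
-- one pass; scales live as 12-bit masks, scores are masked sums, the winning mask is
-- decoded at the end (alternative data structure, same observable result).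


-- ===== PORT A =====
def HEPTATONIC_SCALES : List (List Int) := [
  [0, 2, 4, 5, 7, 9, 11],
  [0, 2, 4, 5, 7, 9, 10],
  [0, 2, 3, 5, 7, 8, 10],
  [0, 2, 4, 6, 7, 9, 11],
  [0, 2, 3, 5, 7, 9, 10],
  [0, 1, 3, 5, 7, 8, 10],
  [0, 2, 3, 5, 7, 8, 11],
  [0, 2, 3, 5, 7, 9, 11],
  [0, 1, 3, 5, 6, 8, 10],
  [0, 1, 4, 5, 7, 8, 10],
  [0, 1, 4, 5, 7, 8, 11],
  [0, 2, 3, 6, 7, 8, 11],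
  [0, 1, 3, 5, 7, 9, 10],
  [0, 2, 4, 6, 8, 9, 11],
  [0, 2, 4, 6, 7, 9, 10],
  [0, 2, 4, 5, 7, 8, 10],
  [0, 2, 3, 5, 6, 8, 10],
  [0, 1, 3, 4, 6, 8, 10]]

-- the count is order-independent, so folding over set(notes) in first-insertion order is exact
def count_common_notes (scale : List Int) (notes : List Int) : Int :=
  let scaleSet : PySem.Set Int := PySem.Set.ofList (scale.map (fun n => PySem.Int.mod n 12))
  (PySem.Set.ofList notes).foldl
    (fun count n => if PySem.Int.mod n 12 ∈ scaleSet then count + 1 else count) 0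

def max_match_heptatonic_scale (notes : List Int) : List Int :=
  (HEPTATONIC_SCALES.foldl
    (fun (st : Int × List Int) scale =>
      let count := count_common_notes scale notes
      if count > st.1 then (count, scale) else st)
    (0, [])).2

-- ===== PORT B =====
def SCALE_MASKS : List Nat := [2741, 1717, 1453, 2773, 1709, 1451, 2477, 2733, 1387,
                               1459, 2483, 2509, 1707, 2901, 1749, 1461, 1389, 1371]

-- hist[n % 12] += 1 : exact because 0 ≤ n % 12 < 12 = len(hist), so the index is in range
def histStep (h : List Int) (n : Int) : List Int :=
  h.set (PySem.Int.mod n 12).toNat (PySem.List.pyGetD h (PySem.Int.mod n 12) 0 + 1)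

-- 'for p in range(12): if (mask >> p) & 1: c += hist[p]' (range(12) = List.range 12, exact)
def maskScore (hist : List Int) (mask : Nat) : Int :=
  (List.range 12).foldl
    (fun c p => if (mask >>> p) &&& 1 = 1 then c + PySem.List.pyGetD hist (p : Int) 0 else c) 0

def pickBest (hist : List Int) : List Nat → Int → Nat → Nat
  | [], _, best_mask => best_mask
  | mask :: rest, best_count, best_mask =>
    let c := maskScore hist mask
    if c > best_count then pickBest hist rest c mask else pickBest hist rest best_count best_mask

-- '[p for p in range(12) if (mask >> p) & 1]'
def decodeMask (mask : Nat) : List Int :=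
  ((List.range 12).filter (fun p => (mask >>> p) &&& 1 == 1)).map (fun p => (p : Int))

def max_match_heptatonic_scale_alt (notes : List Int) : List Int :=
  -- the histogram is order-independent, so folding over set(notes) in list order is exact
  let hist := (PySem.Set.ofList notes).foldl histStep (List.replicate 12 0)
  decodeMask (pickBest hist SCALE_MASKS 0 0)

-- ===== PRECONDITION & SPEC =====
def Spec_max_match_heptatonic_scale (notes : List Int) (out : List Int) : Prop := out = max_match_heptatonic_scale_alt notes
instance (notes : List Int) (out : List Int) : Decidable (Spec_max_match_heptatonic_scale notes out) := by unfold Spec_max_match_heptatonic_scale; infer_instance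

-- ===== CLAIM (what is proved, stated in full; the proofs are below) =====
def Claim_equal_max_match_heptatonic_scale : Prop := ∀ (notes : List Int), Dom_max_match_heptatonic_scale notes → Spec_max_match_heptatonic_scale notes (max_match_heptatonic_scale notes)

-- ===== LEMMAS AND PROOFS =====

-- (scale, mask) pairs: HEPTATONIC_SCALES and SCALE_MASKS zipped
def pvPairs : List (List Int × Nat) := HEPTATONIC_SCALES.zip SCALE_MASKS

-- how many elements of l have pitch class k (0 ≤ k < 12)
def cnt : List Int → Nat → Int
  | [], _ => 0
  | n :: l, k => (if (PySem.Int.mod n 12).toNat = k then 1 else 0) + cnt l k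

lemma histStep_map (g : Nat → Int) (n : Int) :
    histStep ((List.range 12).map g) n =
      (List.range 12).map (fun k => if (PySem.Int.mod n 12).toNat = k then g k + 1 else g k) := by
  have h0 : 0 ≤ PySem.Int.mod n 12 := PySem.Int.mod_nonneg n (by norm_num)
  have h1 : PySem.Int.mod n 12 < 12 := PySem.Int.mod_lt n (by norm_num)
  have hmi : PySem.Int.mod n 12 = ((PySem.Int.mod n 12).toNat : Int) := by omega
  have hlt : (PySem.Int.mod n 12).toNat < 12 := by omega
  set m := (PySem.Int.mod n 12).toNat with hm
  unfold histStep
  rw [hmi]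
  have hrange : List.range 12 = [0,1,2,3,4,5,6,7,8,9,10,11] := by decide
  rw [hrange]
  interval_cases m <;> simp [PySem.List.pyGetD, List.set]

lemma hist_fold (l : List Int) (g : Nat → Int) :
    l.foldl histStep ((List.range 12).map g) =
      (List.range 12).map (fun k => g k + cnt l k) := by
  induction l generalizing g with
  | nil => simp [cnt]
  | cons n t ih =>
      simp only [List.foldl_cons]
      rw [histStep_map, ih]
      congr 1
      funext k
      simp only [cnt]
      by_cases h : (PySem.Int.mod n 12).toNat = k
      · simp only [if_pos h]; ring
      · simp only [if_neg h]; ring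

lemma maskScore_map (f : Nat → Int) (mask : Nat) :
    maskScore ((List.range 12).map f) mask =
      (((List.range 12).filter (fun p => decide ((mask >>> p) &&& 1 = 1))).map f).sum := by
  unfold maskScore
  rw [PySem.List.foldl_ite_eq_foldl_filter, PySem.List.foldl_add]
  rw [List.map_congr_left (g := f) ?_, zero_add]
  intro p hp
  have hlt : p < 12 := by
    have := List.mem_filter.mp hp |>.1
    simpa using this
  simp [PySem.List.pyGetD_natCast, List.getD, List.getElem?_map, List.getElem?_range hlt]

-- the 0/1-sum the mask selects from the histogram of one note = its membership indicator
lemma ind_sum (sc : List Int) (mask : Nat) (h : (sc, mask) ∈ pvPairs) (n : Int) :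
    (((List.range 12).filter (fun p => decide ((mask >>> p) &&& 1 = 1))).map
        (fun k => if (PySem.Int.mod n 12).toNat = k then (1 : Int) else 0)).sum
      = if PySem.Int.mod n 12 ∈
            PySem.Set.ofList (sc.map (fun m => PySem.Int.mod m 12)) then 1 else 0 := by
  have h0 : 0 ≤ PySem.Int.mod n 12 := PySem.Int.mod_nonneg n (by norm_num)
  have h1 : PySem.Int.mod n 12 < 12 := PySem.Int.mod_lt n (by norm_num)
  have hmi : PySem.Int.mod n 12 = ((PySem.Int.mod n 12).toNat : Int) := by omega
  set mt := (PySem.Int.mod n 12).toNat with hmt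
  have hlt : mt < 12 := by omega
  rw [hmi]
  fin_cases h <;> interval_cases mt <;> decide

lemma score_pair (sc : List Int) (mask : Nat) (h : (sc, mask) ∈ pvPairs) (l : List Int) :
    maskScore ((List.range 12).map (fun k => 0 + cnt l k)) mask =
      l.foldl (fun count n =>
        if PySem.Int.mod n 12 ∈
            PySem.Set.ofList (sc.map (fun m => PySem.Int.mod m 12)) then count + 1 else count) 0 := by
  rw [PySem.List.foldl_ite_add_one, maskScore_map]
  simp only [zero_add]
  induction l with
  | nil => simp [cnt]
  | cons n t ih =>
      simp only [cnt, List.countP_cons]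
      rw [PySem.List.sum_map_add_int, ih, ind_sum sc mask h n]
      push_cast
      split
      · simp_all; ring
      · simp_all

lemma decode_pairs : ∀ q ∈ pvPairs, decodeMask q.2 = q.1 := by decide

lemma sel_eq (cfun : List Int → Int) (hist : List Int) (pairs : List (List Int × Nat))
    (hc : ∀ q ∈ pairs, cfun q.1 = maskScore hist q.2 ∧ decodeMask q.2 = q.1)
    (acc : Int) (bm : Nat) (ba : List Int) (hb : decodeMask bm = ba) :
    ((pairs.map Prod.fst).foldl
        (fun (st : Int × List Int) scale =>
          if cfun scale > st.1 then (cfun scale, scale) else st) (acc, ba)).2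
      = decodeMask (pickBest hist (pairs.map Prod.snd) acc bm) := by
  induction pairs generalizing acc bm ba with
  | nil => simpa [pickBest] using hb.symm
  | cons q rest ih =>
      obtain ⟨h1, h2⟩ := hc q (List.mem_cons_self ..)
      have hrest : ∀ q ∈ rest, cfun q.1 = maskScore hist q.2 ∧ decodeMask q.2 = q.1 :=
        fun q hq => hc q (List.mem_cons_of_mem _ hq)
      simp only [List.map_cons, List.foldl_cons, pickBest, h1]
      split
      · exact ih hrest _ _ _ h2
      · exact ih hrest _ _ _ hb

-- ===== VERDICT (by name: the statement is the Claim_ definition above) =====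
theorem max_match_heptatonic_scale_spec : Claim_equal_max_match_heptatonic_scale := by
  intro notes _
  unfold Spec_max_match_heptatonic_scale
  unfold max_match_heptatonic_scale max_match_heptatonic_scale_alt
  have hrep : (List.replicate 12 (0 : Int)) = (List.range 12).map (fun _ => (0 : Int)) := by decide
  rw [hrep, hist_fold]
  have hfst : HEPTATONIC_SCALES = pvPairs.map Prod.fst := by decide
  have hsnd : SCALE_MASKS = pvPairs.map Prod.snd := by decide
  rw [hfst, hsnd]
  exact sel_eq _ _ _ (fun q hq => ⟨(score_pair q.1 q.2 hq _).symm, decode_pairs q hq⟩) 0 0 [] (by decide)
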